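-- pv_equiv track=rewrite | github.com/KirillLadin/tinkoff_2 | 7.py | f
-- ===== SOURCE A (Python) =====
-- def f(s):
--     d = dict()
--     pos = 0
--     for c in s:
--         if c not in d:
--             d[c] = [pos]
--         else:
--             d[c].append(pos)
--         pos += 1
--     s = sorted(s)
--     res = 0
--     pos = 0
--     for c in s:
--         if len(d[c]) == 1:
--             a = d[c][0]
--             if a >= pos:
--                 res += d[c][0] - pos
--             else:
--                 res += len(s) - pos + d[c][0]
--             pos = d[c][0]
--         else:
--             lst = d[c]
--             min = len(s) + 1
--             for l in lst:
--                 if l < min: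
--                     min = l
--             if pos < min:
--                 res += min - pos
--             else:
--                 res += len(s) - pos + min
--             pos = min
--             d[c].remove(min)
--     return res
-- ===== SOURCE B (Python) =====
-- def f(s):
--     n = len(s)
--     d = {}
--     for i, c in enumerate(s):
--         d.setdefault(c, []).append(i)
--     for lst in d.values():
--         lst.reverse()
--     res = 0
--     prev = 0
--     for c in sorted(s):
--         lst = d[c]
--         p = lst.pop()
--         if lst:
--             # a later occurrence of c is still needed: the move pays a positive circular distance
--             res += (p - prev - 1) % n + 1
--         else:
--             res += (p - prev) % n
--         prev = p
--     return res
-- ===== Notes on version B (the rewrite author's own statement) =====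
-- stated objective: faster
-- what changed: B replaces A's per-character O(n) min-scan and list.remove over the remaining-positions list by grouping positions once, reversing each group and popping the smallest remaining position in O(1), and computes each step's charge as one modular expression ((p-prev-1)%n+1 for a non-final occurrence, (p-prev)%n for the final one) instead of A's branch chains.
import Mathlib
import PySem

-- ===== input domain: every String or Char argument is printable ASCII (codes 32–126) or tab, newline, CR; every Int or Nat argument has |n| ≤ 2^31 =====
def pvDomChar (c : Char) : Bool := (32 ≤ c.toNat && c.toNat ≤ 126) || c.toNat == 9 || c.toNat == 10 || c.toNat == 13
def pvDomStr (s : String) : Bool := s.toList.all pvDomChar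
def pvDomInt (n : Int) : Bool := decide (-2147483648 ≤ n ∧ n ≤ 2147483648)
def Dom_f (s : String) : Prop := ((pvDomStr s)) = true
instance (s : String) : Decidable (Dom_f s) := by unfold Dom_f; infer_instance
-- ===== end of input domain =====

-- B groups positions once, reversing each group so the smallest remaining position is popped in
-- O(1), and charges each move a single modular expression — replacing A's per-character min-scan,
-- list.remove and branch chains.

-- ===== PORT A =====
-- first loop of A: d[c] collects the positions of c, pos is the running counter
def buildA (st : PySem.Dict Char (List Int) × Int) (c : Char) :
    PySem.Dict Char (List Int) × Int :=
  (if st.1.contains c = false then st.1.insert c [st.2]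
   else st.1.modify c [] (fun l => l ++ [st.2]),     -- d[c].append(pos)
   st.2 + 1)

-- A's inner min loop: min = len(s) + 1; for l in lst: if l < min: min = l
def minScanA (n : Int) (lst : List Int) : Int :=
  lst.foldl (fun m l => if l < m then l else m) (n + 1)

-- second loop of A; state (d, res, pos)
def stepA (n : Int) (st : PySem.Dict Char (List Int) × Int × Int) (c : Char) :
    PySem.Dict Char (List Int) × Int × Int :=
  let lst := st.1.getD c []                          -- d[c]; every c of sorted(s) is a key of d
  if lst.length == 1 then
    let a := PySem.List.pyGetD lst 0 0               -- d[c][0]; lst is nonempty whenever c is a key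
    (st.1, (if st.2.2 ≤ a then st.2.1 + (a - st.2.2) else st.2.1 + (n - st.2.2 + a)), a)
  else
    let m := minScanA n lst
    (st.1.modify c [] (fun l => (PySem.List.remove? l m).getD l),   -- d[c].remove(min); m ∈ lst here
     (if st.2.2 < m then st.2.1 + (m - st.2.2) else st.2.1 + (n - st.2.2 + m)), m)

def f (s : String) : Int :=
  let d := (s.toList.foldl buildA (PySem.Dict.empty, 0)).1
  let t := PySem.List.sorted s.toList (fun c => c) false   -- s = sorted(s)
  let n : Int := (t.length : Int)                          -- len(s) after the reassignment
  (t.foldl (stepA n) (d, 0, 0)).2.1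

-- ===== PORT B =====
-- B's grouping loop: d.setdefault(c, []).append(i)
def buildB (d : PySem.Dict Char (List Int)) (q : Int × Char) : PySem.Dict Char (List Int) :=
  (d.setdefault q.2 []).modify q.2 [] (fun l => l ++ [q.1])

-- B's main loop; state (d, res, prev)
def stepB (n : Int) (st : PySem.Dict Char (List Int) × Int × Int) (c : Char) :
    PySem.Dict Char (List Int) × Int × Int :=
  match PySem.List.pop? (st.1.getD c []) with        -- p = d[c].pop(); d[c] is nonempty here
  | none => st
  | some pr =>
      (st.1.insert c pr.2,
       st.2.1 + (if pr.2 ≠ [] then PySem.Int.mod (pr.1 - st.2.2 - 1) n + 1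
                 else PySem.Int.mod (pr.1 - st.2.2) n),
       pr.1)

def f_alt (s : String) : Int :=
  let n : Int := (s.toList.length : Int)
  let d := (PySem.List.enumerate s.toList 0).foldl buildB PySem.Dict.empty
  let d := PySem.Dict.mk (d.items.map (fun p => (p.1, p.2.reverse)))  -- each lst reversed in place
  ((PySem.List.sorted s.toList (fun c => c) false).foldl (stepB n) (d, 0, 0)).2.1

-- ===== PRECONDITION & SPEC =====
def Spec_f (s : String) (out : Int) : Prop := out = f_alt s
instance (s : String) (out : Int) : Decidable (Spec_f s out) := by unfold Spec_f; infer_instance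

-- ===== CLAIM (what is proved, stated in full; the proofs are below) =====
def Claim_equal_f : Prop := ∀ (s : String), Dom_f s → Spec_f s (f s)

-- ===== LEMMAS AND PROOFS =====

-- the ascending list of positions of x in cs
def occ (cs : List Char) (x : Char) : List Int :=
  ((PySem.List.enumerate cs 0).filter (fun q => q.2 == x)).map (·.1)

lemma occ_mem (cs : List Char) (x : Char) (a : Int) :
    a ∈ occ cs x ↔ ∃ (k : Nat) (h : k < cs.length), a = (k : Int) ∧ cs[k] = x := by
  simp only [occ, List.mem_map, List.mem_filter, PySem.List.mem_enumerate_iff]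
  constructor
  · rintro ⟨p, ⟨⟨k, hk, rfl⟩, hx⟩, rfl⟩
    simp only [beq_iff_eq] at hx
    exact ⟨k, hk, by simp, by simpa using hx⟩
  · rintro ⟨k, hk, rfl, hx⟩
    exact ⟨((k : Int), cs[k]), ⟨⟨k, hk, by simp⟩, by simpa using hx⟩, rfl⟩

lemma occ_pairwise (cs : List Char) (x : Char) : List.Pairwise (· < ·) (occ cs x) := by
  have h := (PySem.List.pairwise_lt_enumerate cs 0).filter (fun q => q.2 == x)
  exact List.pairwise_map.mpr h

lemma occ_bounds (cs : List Char) (x : Char) :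
    ∀ a ∈ occ cs x, 0 ≤ a ∧ a < (cs.length : Int) := by
  intro a ha
  obtain ⟨k, hk, rfl, -⟩ := (occ_mem cs x a).mp ha
  omega

lemma occ_length (cs : List Char) (x : Char) : (occ cs x).length = cs.count x := by
  have h : cs.count x = List.countP (fun q => q.2 == x) (PySem.List.enumerate cs 0) := by
    conv_lhs => rw [← PySem.List.map_snd_enumerate cs 0]
    rw [List.count_eq_countP, List.countP_map]
    rfl
  simp [occ, ← List.countP_eq_length_filter, h]

lemma getD_eq_get?D {κ ν : Type} [BEq κ] (d : PySem.Dict κ ν) (k : κ) (dflt : ν) :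
    d.getD k dflt = (d.get? k).getD dflt := by
  simp [PySem.Dict.getD]

lemma buildA_getD : ∀ (l : List Char) (d : PySem.Dict Char (List Int)) (p : Int) (x : Char),
    ((l.foldl buildA (d, p)).1).getD x []
      = d.getD x [] ++ ((PySem.List.enumerate l p).filter (fun q => q.2 == x)).map (·.1) := by
  intro l
  induction l with
  | nil => intro d p x; simp [PySem.List.enumerate_nil]
  | cons c l ih =>
    intro d p x
    rw [List.foldl_cons]
    have hstep : (buildA (d, p) c).1.getD x []
        = d.getD x [] ++ (if c == x then [p] else []) := by
      simp only [buildA]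
      by_cases hc : d.contains c = false
      · rw [if_pos hc]
        by_cases hx : x = c
        · subst hx
          rw [PySem.Dict.getD_insert_self]
          rw [getD_eq_get?D, (PySem.Dict.get?_eq_none_iff_contains d x).mpr hc]
          simp
        · rw [PySem.Dict.getD_insert_of_ne _ _ _ hx]
          have : (c == x) = false := by simpa [beq_iff_eq] using fun h => hx h.symm
          simp [this]
      · rw [if_neg hc, PySem.Dict.getD_modify]
        by_cases hx : x = c
        · subst hx; simp
        · have : (c == x) = false := by simpa [beq_iff_eq] using fun h => hx h.symm
          simp [hx, this]
    have hbp : (buildA (d, p) c).2 = p + 1 := rfl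
    have : l.foldl buildA (buildA (d, p) c) = l.foldl buildA ((buildA (d, p) c).1, p + 1) := by
      rw [← hbp]
    rw [this, ih]
    rw [PySem.List.enumerate_cons, List.filter_cons, hstep]
    by_cases hcx : (c == x) = true
    · simp only [hcx]
      simp [List.append_assoc]
    · have : ((p, c).2 == x) = false := by simpa using hcx
      simp only [this]
      simp

lemma buildB_getD : ∀ (l : List (Int × Char)) (d : PySem.Dict Char (List Int)) (x : Char),
    (l.foldl buildB d).getD x []
      = d.getD x [] ++ (l.filter (fun q => q.2 == x)).map (·.1) := by
  intro l
  induction l with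
  | nil => intro d x; simp
  | cons q l ih =>
    intro d x
    rw [List.foldl_cons, ih]
    have hstep : (buildB d q).getD x [] = d.getD x [] ++ (if q.2 == x then [q.1] else []) := by
      simp only [buildB]
      rw [PySem.Dict.getD_modify]
      by_cases hx : x = q.2
      · subst hx
        rw [PySem.Dict.getD_setdefault_self]
        simp
      · rw [if_neg hx, getD_eq_get?D, PySem.Dict.get?_setdefault_of_ne _ _ hx, ← getD_eq_get?D]
        have : (q.2 == x) = false := by simpa [beq_iff_eq] using fun h => hx h.symm
        simp [this]
    rw [List.filter_cons, hstep]
    by_cases hcx : (q.2 == x) = true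
    · simp only [hcx]
      simp [List.append_assoc]
    · have hf : (q.2 == x) = false := by simpa using hcx
      simp only [hf]
      simp

lemma mk_map_reverse_getD : ∀ (ps : List (Char × List Int)) (x : Char),
    (PySem.Dict.mk (ps.map (fun p => (p.1, p.2.reverse)))).getD x []
      = ((PySem.Dict.mk ps).getD x []).reverse := by
  intro ps
  induction ps with
  | nil => intro x; rfl
  | cons q ps ih =>
    intro x
    rcases q with ⟨k, v⟩
    simp only [List.map_cons]
    rw [getD_eq_get?D, getD_eq_get?D, PySem.Dict.get?_mk_cons, PySem.Dict.get?_mk_cons]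
    by_cases hk : (k == x) = true
    · simp [hk]
    · have hf : (k == x) = false := by simpa using hk
      simp only [hf, Bool.false_eq_true, if_false]
      rw [← getD_eq_get?D, ← getD_eq_get?D]
      exact ih x

-- the cost of one move of the pointer, as A computes it, is the modular distance
lemma mod_cost (pos m n : Int) (h0 : 0 ≤ pos) (h1 : pos < n) (h2 : 0 ≤ m) (h3 : m < n) :
    PySem.Int.mod (m - pos) n = if pos ≤ m then m - pos else n - pos + m := by
  rw [PySem.Int.mod_eq_emod_of_pos (by omega)]
  split_ifs with h
  · exact Int.emod_eq_of_lt (by omega) (by omega)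
  · have e : (m - pos + n) % n = m - pos + n := Int.emod_eq_of_lt (by omega) (by omega)
    have e2 : (m - pos + n) % n = (m - pos) % n := Int.add_emod_right (m - pos) n
    omega

-- the cost of a move that must be strictly positive, as A's multi-occurrence branch computes it
lemma mod_cost2 (pos m n : Int) (h0 : 0 ≤ pos) (h1 : pos < n) (h2 : 0 ≤ m) (h3 : m < n) :
    PySem.Int.mod (m - pos - 1) n + 1 = if pos < m then m - pos else n - pos + m := by
  rw [PySem.Int.mod_eq_emod_of_pos (by omega)]
  split_ifs with h
  · have e : (m - pos - 1) % n = m - pos - 1 := Int.emod_eq_of_lt (by omega) (by omega)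
    omega
  · have e : (m - pos - 1 + n) % n = m - pos - 1 + n := Int.emod_eq_of_lt (by omega) (by omega)
    have e2 : (m - pos - 1 + n) % n = (m - pos - 1) % n := Int.add_emod_right (m - pos - 1) n
    omega

lemma minScan_no_lt : ∀ (l : List Int) (acc : Int), (∀ x ∈ l, ¬ x < acc) →
    l.foldl (fun m l => if l < m then l else m) acc = acc := by
  intro l
  induction l with
  | nil => intro acc _; rfl
  | cons a l ih =>
    intro acc h
    have : ¬ a < acc := h a (List.mem_cons_self ..)
    simp only [List.foldl_cons, if_neg this]
    exact ih acc fun x hx => h x (List.mem_cons_of_mem _ hx)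

lemma minScanA_head (n m : Int) (rest : List Int) (hK : m < n + 1)
    (hrest : ∀ x ∈ rest, m < x) : minScanA n (m :: rest) = m := by
  unfold minScanA
  simp only [List.foldl_cons, if_pos hK]
  exact minScan_no_lt rest m fun x hx => by have := hrest x hx; omega

-- the joint loop invariant: both loops walk the same positions and pay the same cost at every step
lemma mainLoop (n : Int) :
    ∀ (r : List Char) (rem : Char → List Int) (dA dB : PySem.Dict Char (List Int))
      (pos resA resB : Int),
      (∀ c ∈ r, dA.getD c [] = rem c) →
      (∀ c ∈ r, dB.getD c [] = (rem c).reverse) →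
      (∀ c ∈ r, (rem c).length = r.count c) →
      (∀ c ∈ r, List.Pairwise (· < ·) (rem c)) →
      (∀ c ∈ r, ∀ a ∈ rem c, 0 ≤ a ∧ a < n) →
      0 ≤ pos → pos < n →
      (r.foldl (stepA n) (dA, resA, pos)).2.1
        = resA - resB + (r.foldl (stepB n) (dB, resB, pos)).2.1 := by
  intro r
  induction r with
  | nil => intro rem dA dB pos resA resB _ _ _ _ _ _ _; simp
  | cons c r' ih =>
    intro rem dA dB pos resA resB hA hB hlen hpw hbd h0 h1
    have hcr : c ∈ c :: r' := List.mem_cons_self ..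
    have hAc : dA.getD c [] = rem c := hA c hcr
    have hBc : dB.getD c [] = (rem c).reverse := hB c hcr
    have hlc : (rem c).length = r'.count c + 1 := by
      rw [hlen c hcr, List.count_cons_self]
    obtain ⟨m, rest, hL⟩ : ∃ m rest, rem c = m :: rest := by
      cases hrc : rem c with
      | nil => rw [hrc] at hlc; simp at hlc
      | cons a b => exact ⟨a, b, rfl⟩
    have hpwc : List.Pairwise (· < ·) (m :: rest) := hL ▸ hpw c hcr
    have hmrest : ∀ x ∈ rest, m < x := fun x hx => List.rel_of_pairwise_cons hpwc hx
    have hm0 : 0 ≤ m ∧ m < n := hbd c hcr m (by rw [hL]; exact List.mem_cons_self ..)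
    have hpop : PySem.List.pop? ((rem c).reverse) = some (m, rest.reverse) := by
      rw [hL, List.reverse_cons]; exact PySem.List.pop?_last _ _
    rcases eq_or_ne rest [] with hrest | hrest
    · -- last occurrence of c: A's single branch, B's plain modular distance
      have hnotin : c ∉ r' := by
        rw [hL, hrest] at hlc
        simp only [List.length_cons, List.length_nil] at hlc
        exact List.count_eq_zero.mp (by omega)
      have hstepA : stepA n (dA, resA, pos) c
          = (dA, if pos ≤ m then resA + (m - pos) else resA + (n - pos + m), m) := by
        simp only [stepA, hAc, hL, hrest]
        simp
      have hstepB : stepB n (dB, resB, pos) c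
          = (dB.insert c [], resB + PySem.Int.mod (m - pos) n, m) := by
        rw [hrest] at hpop
        simp only [stepB, hBc, hpop, List.reverse_nil]
        simp
      have hcost : PySem.Int.mod (m - pos) n = if pos ≤ m then m - pos else n - pos + m :=
        mod_cost pos m n h0 h1 hm0.1 hm0.2
      rw [List.foldl_cons, List.foldl_cons, hstepA, hstepB]
      have hih := ih rem dA (dB.insert c []) m
        (if pos ≤ m then resA + (m - pos) else resA + (n - pos + m))
        (resB + PySem.Int.mod (m - pos) n)
        (fun c' hc' => hA c' (List.mem_cons_of_mem _ hc'))
        (fun c' hc' => by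
          have hne : c' ≠ c := fun h => hnotin (h ▸ hc')
          rw [PySem.Dict.getD_insert_of_ne _ _ _ hne]
          exact hB c' (List.mem_cons_of_mem _ hc'))
        (fun c' hc' => by
          have hne : c' ≠ c := fun h => hnotin (h ▸ hc')
          rw [hlen c' (List.mem_cons_of_mem _ hc'), List.count_cons_of_ne (Ne.symm hne)])
        (fun c' hc' => hpw c' (List.mem_cons_of_mem _ hc'))
        (fun c' hc' => hbd c' (List.mem_cons_of_mem _ hc'))
        hm0.1 hm0.2
      rw [hih, hcost]
      split_ifs <;> ring
    · -- a later occurrence of c remains: A's min-scan branch, B's positive modular distance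
      have hlen2 : ((rem c).length == 1) = false := by
        rw [hL]
        have : rest.length ≠ 0 := fun h => hrest (List.eq_nil_of_length_eq_zero h)
        simp only [List.length_cons, beq_eq_false_iff_ne, ne_eq]
        omega
      have hmin : minScanA n (rem c) = m := by
        rw [hL]
        exact minScanA_head n m rest (by omega) hmrest
      have hstepA : stepA n (dA, resA, pos) c
          = (dA.modify c [] (fun l => (PySem.List.remove? l m).getD l),
             if pos < m then resA + (m - pos) else resA + (n - pos + m), m) := by
        simp only [stepA, hAc, hlen2, Bool.false_eq_true, if_false, hmin]
      have hrevne : rest.reverse ≠ [] := by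
        simpa using hrest
      have hstepB : stepB n (dB, resB, pos) c
          = (dB.insert c rest.reverse, resB + (PySem.Int.mod (m - pos - 1) n + 1), m) := by
        simp only [stepB, hBc, hpop, if_pos hrevne]
      have hcost : PySem.Int.mod (m - pos - 1) n + 1
          = if pos < m then m - pos else n - pos + m :=
        mod_cost2 pos m n h0 h1 hm0.1 hm0.2
      have hmodc : (dA.modify c [] (fun l => (PySem.List.remove? l m).getD l)).getD c [] = rest := by
        rw [PySem.Dict.getD_modify, if_pos rfl, hAc, hL, PySem.List.remove?_cons_self]
        rfl
      set rem' : Char → List Int := fun x => if x = c then rest else rem x with hrem'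
      have hsub : ∀ x, ∀ a ∈ rem' x, a ∈ rem x := by
        intro x a ha
        by_cases hx : x = c
        · rw [hrem'] at ha; simp only [hx] at ha
          rw [hx, hL]; exact List.mem_cons_of_mem _ ha
        · rw [hrem'] at ha; simpa [hx] using ha
      rw [List.foldl_cons, List.foldl_cons, hstepA, hstepB]
      have hih := ih rem' (dA.modify c [] (fun l => (PySem.List.remove? l m).getD l))
        (dB.insert c rest.reverse) m
        (if pos < m then resA + (m - pos) else resA + (n - pos + m))
        (resB + (PySem.Int.mod (m - pos - 1) n + 1))
        (fun c' hc' => by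
          by_cases hx : c' = c
          · rw [hx, hmodc, hrem']; simp
          · rw [PySem.Dict.getD_modify, if_neg hx, hrem']
            simp only [hx, if_false]
            exact hA c' (List.mem_cons_of_mem _ hc'))
        (fun c' hc' => by
          by_cases hx : c' = c
          · rw [hx, PySem.Dict.getD_insert_self, hrem']; simp
          · rw [PySem.Dict.getD_insert_of_ne _ _ _ hx, hrem']
            simp only [hx, if_false]
            exact hB c' (List.mem_cons_of_mem _ hc'))
        (fun c' hc' => by
          by_cases hx : c' = c
          · subst hx
            have h1 : rest.length + 1 = r'.count c' + 1 := by
              rw [← List.length_cons, ← hL, hlc]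
            simp [hrem']
            omega
          · rw [hrem']; simp only [hx, if_false]
            rw [hlen c' (List.mem_cons_of_mem _ hc'), List.count_cons_of_ne (Ne.symm hx)])
        (fun c' hc' => by
          by_cases hx : c' = c
          · rw [hrem']; simp only [hx]
            exact hpwc.of_cons
          · rw [hrem']; simp only [hx, if_false]
            exact hpw c' (List.mem_cons_of_mem _ hc'))
        (fun c' hc' a ha => by
          by_cases hx : c' = c
          · subst hx
            exact hbd c' hcr a (hsub c' a ha)
          · exact hbd c' (List.mem_cons_of_mem _ hc') a (hsub c' a ha))
        hm0.1 hm0.2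
      rw [hih, hcost]
      split_ifs <;> ring

-- the two programs agree everywhere
lemma f_eq_f_alt (s : String) : f s = f_alt s := by
  by_cases hne : s.toList = []
  · simp only [f, f_alt, hne]
    rfl
  · obtain ⟨h, tl, hcs⟩ : ∃ h tl, s.toList = h :: tl := by
      cases hc : s.toList with
      | nil => exact absurd hc hne
      | cons a b => exact ⟨a, b, rfl⟩
    set cs := s.toList with hcsdef
    set t := PySem.List.sorted cs (fun c => c) false with htdef
    set n : Int := (cs.length : Int) with hndef
    have hn : 0 < n := by
      have : 0 < (h :: tl).length := Nat.succ_pos _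
      rw [hndef, hcs]
      exact_mod_cast this
    have htlen : (t.length : Int) = n := by rw [htdef, PySem.List.length_sorted]
    -- the two dictionaries after the build loops
    set dA0 := (cs.foldl buildA (PySem.Dict.empty, 0)).1 with hdA0
    have hdA : ∀ x, dA0.getD x [] = occ cs x := by
      intro x
      rw [hdA0, buildA_getD]
      have he : (PySem.Dict.empty : PySem.Dict Char (List Int)).getD x [] = [] := by
        simp [pysem]
      rw [he, occ]
      simp
    set dB0 := (PySem.List.enumerate cs 0).foldl buildB PySem.Dict.empty with hdB0
    set dB1 := PySem.Dict.mk (dB0.items.map (fun p => (p.1, p.2.reverse))) with hdB1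
    have hdB : ∀ x, dB1.getD x [] = (occ cs x).reverse := by
      intro x
      rw [hdB1, mk_map_reverse_getD]
      have heta : (PySem.Dict.mk dB0.items) = dB0 := rfl
      rw [heta, hdB0, buildB_getD]
      have he : (PySem.Dict.empty : PySem.Dict Char (List Int)).getD x [] = [] := by
        simp [pysem]
      rw [he, occ]
      simp
    have hf : f s = (t.foldl (stepA (t.length : Int)) (dA0, 0, 0)).2.1 := rfl
    have hfa : f_alt s = (t.foldl (stepB n) (dB1, 0, 0)).2.1 := rfl
    rw [hf, hfa, htlen]
    have hperm : t.Perm cs := PySem.List.sorted_perm cs (fun c => c) false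
    have hih := mainLoop n t (occ cs) dA0 dB1 0 0 0
      (fun c' _ => hdA c')
      (fun c' _ => hdB c')
      (fun c' _ => by rw [occ_length, hperm.count_eq c'])
      (fun c' _ => occ_pairwise cs c')
      (fun c' _ => occ_bounds cs c')
      le_rfl hn
    rw [hih]
    omega

-- ===== VERDICT (by name: the statement is the Claim_ definition above) =====
theorem f_spec : Claim_equal_f := by
  intro s _
  exact f_eq_f_alt s
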